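-- pv_equiv track=rewrite | github.com/harc007/whisper-speaker-diarization | diarize_and_transcribe.py | get_first_occurence_of_multiples
-- ===== SOURCE A (Python) =====
-- def get_first_occurence_of_multiples(xs, n=3):
--     ti = {}
--     i = 0
--     idx_count = 0
--     while i < len(xs) - (n-1):
--         if all([xs[i]==xs[i+p] for p in range(1, n)]) and xs[i] not in ti:
--             ti[xs[i]] = idx_count
--             i += n
--             idx_count += 1
--         else:
--             i += 1
--     return ti
-- ===== SOURCE B (Python) =====
-- def get_first_occurence_of_multiples(xs, n=3):
--     ti = {}
--     run_val = None
--     run_len = 0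
--     for x in xs:
--         if run_len > 0 and x == run_val:
--             run_len += 1
--         else:
--             run_val = x
--             run_len = 1
--         if run_len == n and x not in ti:
--             ti[x] = len(ti)
--     return ti
-- ===== Notes on version B (the rewrite author's own statement) =====
-- stated objective: faster
-- what changed: Replaces the index-jumping while loop with its per-position inner scan over range(1,n) by a single left-to-right pass that tracks the current run value and run length, recording a value the first time its run length reaches n.
import Mathlib
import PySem

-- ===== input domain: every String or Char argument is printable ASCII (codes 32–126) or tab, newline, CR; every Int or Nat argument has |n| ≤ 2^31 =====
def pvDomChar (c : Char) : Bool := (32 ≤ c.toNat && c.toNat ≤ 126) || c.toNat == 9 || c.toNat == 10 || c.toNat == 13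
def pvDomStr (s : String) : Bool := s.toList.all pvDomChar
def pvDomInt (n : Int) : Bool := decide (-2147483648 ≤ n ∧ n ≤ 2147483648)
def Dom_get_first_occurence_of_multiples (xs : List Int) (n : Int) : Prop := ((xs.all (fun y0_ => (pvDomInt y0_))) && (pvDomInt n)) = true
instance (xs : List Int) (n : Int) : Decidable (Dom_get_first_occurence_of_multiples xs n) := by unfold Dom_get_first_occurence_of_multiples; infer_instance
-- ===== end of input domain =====

-- B replaces A's index-jumping scan (inner comparison over range(1,n) at each position)
-- by a single pass tracking the current run's value and length; a timing run measures the speed claim.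

-- ===== PORT A =====
-- dict ti is the association list of its items (all inserted keys are fresh, so insertion appends);
-- idx_count is carried separately as in the Python. fuel = len(xs)+1 bounds the while loop: under
-- Pre_ (1 ≤ n) each iteration increases i by at least 1 and the loop runs at most len(xs) times.
def pvALoop (xs : List Int) (n : Int) : Nat → Int → List (Int × Int) → Int → List (Int × Int)
  | 0, _, ti, _ => ti
  | fuel+1, i, ti, idx =>
    if i < (xs.length : Int) - (n - 1) then
      let v := PySem.List.pyGetD xs i 0
      if ((PySem.List.pyRange 1 n 1).all (fun p => v == PySem.List.pyGetD xs (i + p) 0))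
          && !((ti.map Prod.fst).contains v) then
        pvALoop xs n fuel (i + n) (ti ++ [(v, idx)]) (idx + 1)
      else
        pvALoop xs n fuel (i + 1) ti idx
    else ti

def get_first_occurence_of_multiples (xs : List Int) (n : Int) : List (Int × Int) :=
  pvALoop xs n (xs.length + 1) 0 [] 0

-- ===== PORT B =====
-- state = (ti, run_val, run_len); run_val is None before the first element
def pvBStep (n : Int) (st : List (Int × Int) × Option Int × Int) (x : Int) :
    List (Int × Int) × Option Int × Int :=
  let ti := st.1
  let rv := st.2.1
  let rl := st.2.2
  let rv' := if rl > 0 && rv == some x then rv else some x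
  let rl' := if rl > 0 && rv == some x then rl + 1 else 1
  let ti' := if rl' == n && !((ti.map Prod.fst).contains x) then
               ti ++ [(x, (ti.length : Int))] else ti
  (ti', rv', rl')

def get_first_occurence_of_multiples_alt (xs : List Int) (n : Int) : List (Int × Int) :=
  (xs.foldl (pvBStep n) ([], none, 0)).1

-- ===== PRECONDITION & SPEC =====
-- Pre_ excludes n ≤ 0, on which the Python A never returns a value: it raises IndexError
-- (the vacuously true inner comparison lets i reach an out-of-range index).
def Pre_get_first_occurence_of_multiples (xs : List Int) (n : Int) : Prop := 1 ≤ n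
instance (xs : List Int) (n : Int) : Decidable (Pre_get_first_occurence_of_multiples xs n) := by unfold Pre_get_first_occurence_of_multiples; infer_instance
def pvWitness_get_first_occurence_of_multiples : List Int × Int := ([1, 1, 1, 2, 2, 2, 1], 3)

def Spec_get_first_occurence_of_multiples (xs : List Int) (n : Int) (out : List (Int × Int)) : Prop := out = get_first_occurence_of_multiples_alt xs n
instance (xs : List Int) (n : Int) (out : List (Int × Int)) : Decidable (Spec_get_first_occurence_of_multiples xs n out) := by unfold Spec_get_first_occurence_of_multiples; infer_instance

-- ===== CLAIM (what is proved, stated in full; the proofs are below) =====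
def Claim_equal_get_first_occurence_of_multiples : Prop := ∀ (xs : List Int) (n : Int), Dom_get_first_occurence_of_multiples xs n → Pre_get_first_occurence_of_multiples xs n → Spec_get_first_occurence_of_multiples xs n (get_first_occurence_of_multiples xs n)

-- ===== LEMMAS AND PROOFS =====

-- the window test at Nat position s ('the n elements starting at s are all equal'), as a Bool over total getD
def pvWinB (xs : List Int) (N s : Nat) : Bool :=
  (List.range N).all (fun j => decide (1 ≤ j → xs.getD (s + j) 0 = xs.getD s 0))

-- the reference step: at window start s, record xs[s] iff the window is constant, a run STARTS at s,
-- and the value is not yet a key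
def pvWCondB (xs : List Int) (N s : Nat) (ti : List (Int × Int)) : Bool :=
  pvWinB xs N s && (decide (s = 0) || !(xs.getD (s - 1) 0 == xs.getD s 0))
    && !((ti.map Prod.fst).contains (xs.getD s 0))

def pvWStep (xs : List Int) (N : Nat) (ti : List (Int × Int)) (s : Nat) : List (Int × Int) :=
  if pvWCondB xs N s ti then ti ++ [(xs.getD s 0, (ti.length : Int))] else ti

-- length of the maximal constant suffix of (xs.take k)
def pvTrail (xs : List Int) : Nat → Nat
  | 0 => 0
  | k+1 => if 0 < k && xs.getD k 0 == xs.getD (k-1) 0 then pvTrail xs k + 1 else 1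

lemma pvWinB_iff (xs : List Int) (N s : Nat) :
    pvWinB xs N s = true ↔ ∀ j, j < N → 1 ≤ j → xs.getD (s + j) 0 = xs.getD s 0 := by
  simp only [pvWinB, List.all_eq_true, List.mem_range, decide_eq_true_eq]

lemma pvTrail_pos (xs : List Int) (k : Nat) (h : 1 ≤ k) : 1 ≤ pvTrail xs k := by
  cases k with
  | zero => omega
  | succ m => simp only [pvTrail]; split <;> omega

lemma pvTrail_le (xs : List Int) (k : Nat) : pvTrail xs k ≤ k := by
  induction k with
  | zero => simp [pvTrail]
  | succ m ih => simp only [pvTrail]; split <;> [skip; skip] <;> [omega; (rename_i h; simp at h; omega)]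

lemma pvTrail_run (xs : List Int) (k : Nat) :
    ∀ j, k - pvTrail xs k ≤ j → j < k → xs.getD j 0 = xs.getD (k-1) 0 := by
  induction k with
  | zero => intro j h1 h2; omega
  | succ m ih =>
    intro j h1 h2
    simp only [pvTrail] at h1
    by_cases hc : (0 < m && xs.getD m 0 == xs.getD (m-1) 0) = true
    · simp only [hc, if_pos] at h1
      simp only [Bool.and_eq_true, decide_eq_true_eq, beq_iff_eq] at hc
      rcases Nat.lt_succ_iff_lt_or_eq.mp h2 with h2' | rfl
      · have := ih j (by omega) h2'
        rw [this]; simp only [Nat.add_sub_cancel]; exact hc.2.symm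
      · simp
    · simp only [if_neg hc] at h1
      have : j = m := by omega
      subst this; simp

lemma pvTrail_break (xs : List Int) (k : Nat) (h : pvTrail xs k < k) :
    xs.getD (k - pvTrail xs k - 1) 0 ≠ xs.getD (k-1) 0 := by
  induction k with
  | zero => simp [pvTrail] at h
  | succ m ih =>
    simp only [pvTrail] at h ⊢
    by_cases hc : (0 < m && xs.getD m 0 == xs.getD (m-1) 0) = true
    · simp only [hc, if_pos] at h ⊢
      simp only [Bool.and_eq_true, decide_eq_true_eq, beq_iff_eq] at hc
      have hlt : pvTrail xs m < m := by omega
      have := ih hlt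
      have hle := pvTrail_le xs m
      have hidx : m + 1 - (pvTrail xs m + 1) - 1 = m - pvTrail xs m - 1 := by omega
      rw [hidx]; simp only [Nat.add_sub_cancel]; rw [← hc.2] at this; simpa using this
    · simp only [if_neg hc] at h ⊢
      simp only [Bool.and_eq_true, decide_eq_true_eq, beq_iff_eq, not_and_or, not_lt,
        Nat.le_zero] at hc
      rcases hc with hm | hne
      · omega
      · simp only [Nat.add_sub_cancel]; intro he; exact hne he.symm


lemma pvWinB_shift (xs : List Int) (N s : Nat) (h : pvWinB xs N s = true)
    (he : xs.getD (s-1) 0 = xs.getD s 0) (hs : 1 ≤ s) : pvWinB xs N (s-1) = true := by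
  rw [pvWinB_iff] at h ⊢
  intro j hj h1
  by_cases hj1 : j = 1
  · subst hj1; rw [show s - 1 + 1 = s from by omega]; exact he.symm
  · rw [show s - 1 + j = s + (j-1) from by omega, h (j-1) (by omega) (by omega)]
    exact he.symm

lemma pvTrailWin (xs : List Int) (N k : Nat) (hN1 : 1 ≤ N) (hk : N ≤ k + 1) :
    pvTrail xs (k+1) = N ↔
      (pvWinB xs N (k+1-N) = true ∧ (k+1-N = 0 ∨ xs.getD (k-N) 0 ≠ xs.getD (k+1-N) 0)) := by
  have hrun := pvTrail_run xs (k+1)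
  rw [show k + 1 - 1 = k from by omega] at hrun
  constructor
  · intro ht
    rw [ht] at hrun
    have hwin : pvWinB xs N (k+1-N) = true := by
      rw [pvWinB_iff]
      intro j hj h1
      have e1 := hrun (k+1-N+j) (by omega) (by omega)
      have e2 := hrun (k+1-N) (by omega) (by omega)
      rw [e1, e2]
    refine ⟨hwin, ?_⟩
    by_cases hs0 : k+1-N = 0
    · exact Or.inl hs0
    · refine Or.inr ?_
      have hb := pvTrail_break xs (k+1) (by omega)
      rw [ht, show k+1 - N - 1 = k - N from by omega, show k + 1 - 1 = k from by omega] at hb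
      have e2 := hrun (k+1-N) (by omega) (by omega)
      intro heq; exact hb (heq.trans e2)
  · rintro ⟨hw, hrs⟩
    rw [pvWinB_iff] at hw
    set t := pvTrail xs (k+1) with htdef
    have ht1 : 1 ≤ t := pvTrail_pos _ _ (by omega)
    have htle : t ≤ k + 1 := pvTrail_le _ _
    rcases lt_trichotomy t N with hlt | heq | hgt
    · exfalso
      have hN2 : 2 ≤ N := by omega
      have hknd : xs.getD k 0 = xs.getD (k+1-N) 0 := by
        have := hw (N-1) (by omega) (by omega)
        rw [show k+1-N + (N-1) = k from by omega] at this
        exact this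
      have hb : xs.getD (k - t) 0 ≠ xs.getD k 0 := by
        have h0 := pvTrail_break xs (k+1) (by omega)
        rw [show k+1 - t - 1 = k - t from by omega, show k + 1 - 1 = k from by omega] at h0
        exact h0
      have hkt : xs.getD (k - t) 0 = xs.getD (k+1-N) 0 := by
        rcases Nat.eq_zero_or_pos (N - 1 - t) with h0 | hpos
        · rw [show k - t = k+1-N from by omega]
        · rw [show k - t = k+1-N + (N-1-t) from by omega]
          exact hw _ (by omega) (by omega)
      exact hb (hkt.trans hknd.symm)
    · exact heq
    · exfalso
      have hs1 : 1 ≤ k+1-N := by omega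
      have hne := hrs.resolve_left (by omega)
      have e1 := hrun (k - N) (by omega) (by omega)
      have e2 := hrun (k+1-N) (by omega) (by omega)
      exact hne (e1.trans e2.symm)

lemma pvWSkip (xs : List Int) (N : Nat) (l : List Nat) (ti : List (Int × Int))
    (h : ∀ s ∈ l, pvWCondB xs N s ti = false) : l.foldl (pvWStep xs N) ti = ti := by
  induction l with
  | nil => rfl
  | cons a l ih =>
    rw [List.foldl_cons, pvWStep, if_neg (by rw [h a (by simp)]; simp)]
    exact ih (fun s hs => h s (by simp [hs]))

lemma pvATest (xs : List Int) (n : Int) (hn : 1 ≤ n) (s : Nat) :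
    ((PySem.List.pyRange 1 n 1).all
      (fun p => xs.getD s 0 == PySem.List.pyGetD xs (((s:Nat):Int) + p) 0))
      = pvWinB xs n.toNat s := by
  have hNn : ((n.toNat : Nat) : Int) = n := Int.toNat_of_nonneg (by omega)
  rw [Bool.eq_iff_iff, List.all_eq_true, pvWinB_iff]
  constructor
  · intro h j hj h1
    have hp : ((j:Nat):Int) ∈ PySem.List.pyRange 1 n 1 :=
      PySem.List.mem_pyRange_one.mpr ⟨by exact_mod_cast h1, by omega⟩
    have := h _ hp
    rw [beq_iff_eq, show ((s:Nat):Int) + ((j:Nat):Int) = (((s+j : Nat)):Int) from by push_cast; ring,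
      PySem.List.pyGetD_natCast] at this
    exact this.symm
  · intro h p hp
    obtain ⟨h1, h2⟩ := PySem.List.mem_pyRange_one.mp hp
    lift p to Nat using (by omega) with j
    rw [beq_iff_eq, show ((s:Nat):Int) + ((j:Nat):Int) = (((s+j : Nat)):Int) from by push_cast; ring,
      PySem.List.pyGetD_natCast]
    exact (h j (by omega) (by exact_mod_cast h1)).symm

lemma pvAW (xs : List Int) (n : Int) (hn : 1 ≤ n) :
    ∀ (fuel : Nat) (s : Nat) (ti : List (Int × Int)),
      xs.length + 1 - s ≤ fuel →
      (s = 0 ∨ xs.getD (s-1) 0 ∈ ti.map Prod.fst ∨ xs.getD (s-1) 0 ≠ xs.getD s 0 ∨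
        pvWinB xs n.toNat (s-1) = false) →
      pvALoop xs n fuel ((s:Nat):Int) ti ((ti.length : Nat) : Int)
        = (List.range' s (xs.length + 1 - n.toNat - s)).foldl (pvWStep xs n.toNat) ti := by
  have hNn : ((n.toNat : Nat) : Int) = n := Int.toNat_of_nonneg (by omega)
  have hN1 : 1 ≤ n.toNat := by omega
  intro fuel
  induction fuel with
  | zero =>
    intro s ti hf hinv
    rw [show xs.length + 1 - n.toNat - s = 0 from by omega]
    rfl
  | succ f ih =>
    intro s ti hf hinv
    by_cases hse : s + n.toNat ≤ xs.length
    · have hsL : s < xs.length := by omega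
      have hcond : ((s:Nat):Int) < (xs.length : Int) - (n - 1) := by omega
      rw [pvALoop, if_pos hcond]
      simp only [PySem.List.pyGetD_natCast, pvATest xs n hn s]
      have hslt : s < xs.length + 1 - n.toNat := by omega
      rw [show xs.length + 1 - n.toNat - s = (xs.length + 1 - n.toNat - s - 1) + 1 from by omega,
        List.range'_succ, List.foldl_cons]
      by_cases hrec : (pvWinB xs n.toNat s && !((ti.map Prod.fst).contains (xs.getD s 0))) = true
      · -- record branch
        have hrec' := hrec
        simp only [Bool.and_eq_true, Bool.not_eq_true'] at hrec'
        obtain ⟨hwin, hni⟩ := hrec'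
        have hwinP := (pvWinB_iff xs n.toNat s).mp hwin
        have hrs : s = 0 ∨ xs.getD (s-1) 0 ≠ xs.getD s 0 := by
          rcases hinv with h0 | hmem | hne | hwf
          · exact Or.inl h0
          · refine Or.inr (fun heq => ?_)
            rw [heq] at hmem
            rw [List.contains_iff_mem.mpr hmem] at hni
            exact Bool.true_eq_false.mp hni
          · exact Or.inr hne
          · refine Or.inr (fun heq => ?_)
            by_cases hs0 : s = 0
            · rw [hs0] at hwf hwin
              norm_num at hwf
              rw [hwf] at hwin
              exact Bool.false_ne_true hwin
            · rw [pvWinB_shift xs n.toNat s hwin heq (by omega)] at hwf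
              exact Bool.true_eq_false.mp hwf
        have hmid : (decide (s = 0) || !(xs.getD (s-1) 0 == xs.getD s 0)) = true := by
          rcases hrs with h0 | hne
          · simp [h0]
          · rw [beq_eq_false_iff_ne.mpr hne]; simp
        have hcondw : pvWCondB xs n.toNat s ti = true := by
          rw [pvWCondB, hwin, hni, hmid]; rfl
        rw [if_pos hrec]
        rw [pvWStep, if_pos hcondw]
        set ti' := ti ++ [(xs.getD s 0, ((ti.length : Nat) : Int))] with hti'
        have hlen' : ((ti.length : Nat) : Int) + 1 = ((ti'.length : Nat) : Int) := by
          rw [hti']; simp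
        have hcast : ((s:Nat):Int) + n = (((s + n.toNat : Nat)):Int) := by push_cast; omega
        rw [hlen', hcast]
        set E := xs.length + 1 - n.toNat with hE
        set a := min (n.toNat - 1) (E - s - 1) with ha
        have hsplit : List.range' (s+1) (E - s - 1) =
            List.range' (s+1) a ++ List.range' (s+1+a) (E - s - 1 - a) := by
          rw [List.range'_append_1, show a + (E - s - 1 - a) = E - s - 1 from by omega]
        rw [hsplit, List.foldl_append]
        have hskip : (List.range' (s+1) a).foldl (pvWStep xs n.toNat) ti' = ti' := by
          apply pvWSkip
          intro s' hs'
          rw [List.mem_range'_1] at hs'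
          have h1 : xs.getD (s'-1) 0 = xs.getD s 0 := by
            by_cases h : s' - 1 = s
            · rw [h]
            · rw [show s' - 1 = s + (s' - 1 - s) from by omega]
              exact hwinP _ (by omega) (by omega)
          have h2 : xs.getD s' 0 = xs.getD s 0 := by
            rw [show s' = s + (s' - s) from by omega]
            exact hwinP _ (by omega) (by omega)
          rw [pvWCondB]
          have hbeq : (xs.getD (s'-1) 0 == xs.getD s' 0) = true := beq_iff_eq.mpr (h1.trans h2.symm)
          have : (decide (s' = 0) || !(xs.getD (s'-1) 0 == xs.getD s' 0)) = false := by
            rw [hbeq]; simp [show s' ≠ 0 from by omega]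
          rw [this]; simp
        rw [hskip]
        have hIH := ih (s + n.toNat) ti' (by omega) (by
          refine Or.inr (Or.inl ?_)
          have : xs.getD (s + n.toNat - 1) 0 = xs.getD s 0 := by
            by_cases h : n.toNat = 1
            · rw [h]; simp
            · rw [show s + n.toNat - 1 = s + (n.toNat - 1) from by omega]
              exact hwinP _ (by omega) (by omega)
          rw [this, hti']
          simp)
        rw [hIH]
        by_cases hEc : s + n.toNat ≤ E
        · rw [show s + 1 + a = s + n.toNat from by omega,
            show E - s - 1 - a = E - (s + n.toNat) from by omega]
        · rw [show E - s - 1 - a = 0 from by omega, show E - (s + n.toNat) = 0 from by omega]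
          rfl
      · -- else branch
        have hrecf : (pvWinB xs n.toNat s && !((ti.map Prod.fst).contains (xs.getD s 0))) = false :=
          Bool.eq_false_iff.mpr hrec
        rw [if_neg hrec]
        have hwc : pvWinB xs n.toNat s = false ∨
            (ti.map Prod.fst).contains (xs.getD s 0) = true := by
          by_cases hwin : pvWinB xs n.toNat s = true
          · rw [hwin] at hrecf
            simp only [Bool.true_and] at hrecf
            exact Or.inr (by revert hrecf; cases (ti.map Prod.fst).contains (xs.getD s 0) <;> simp)
          · exact Or.inl (Bool.eq_false_iff.mpr hwin)
        have hcondw : pvWCondB xs n.toNat s ti = false := by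
          rw [pvWCondB]
          rcases hwc with hw | hc
          · rw [hw]; simp
          · rw [hc]; simp
        rw [pvWStep, if_neg (by rw [hcondw]; exact Bool.false_ne_true)]
        have hcast : ((s:Nat):Int) + 1 = (((s + 1 : Nat)):Int) := by push_cast; ring
        rw [hcast]
        have hIH := ih (s + 1) ti (by omega) (by
          rcases hwc with hw | hc
          · refine Or.inr (Or.inr (Or.inr ?_))
            rw [show s + 1 - 1 = s from by omega]
            exact hw
          · refine Or.inr (Or.inl ?_)
            rw [show s + 1 - 1 = s from by omega]
            exact List.contains_iff_mem.mp hc)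
        rw [hIH, show xs.length + 1 - n.toNat - s - 1 = xs.length + 1 - n.toNat - (s+1) from by omega]
    · -- loop condition false
      have hcond : ¬ (((s:Nat):Int) < (xs.length : Int) - (n - 1)) := by omega
      rw [pvALoop, if_neg hcond, show xs.length + 1 - n.toNat - s = 0 from by omega]
      rfl

lemma pvBStep_eval (n : Int) (ti : List (Int × Int)) (rv : Option Int) (rl : Int) (x : Int) :
    pvBStep n (ti, rv, rl) x =
      (if ((if rl > 0 && rv == some x then rl + 1 else 1) == n && !((ti.map Prod.fst).contains x))
         then ti ++ [(x, (ti.length : Int))] else ti,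
       (if rl > 0 && rv == some x then rv else some x),
       (if rl > 0 && rv == some x then rl + 1 else 1)) := rfl

lemma pvBW (xs : List Int) (n : Int) (hn : 1 ≤ n) :
    ∀ k, k ≤ xs.length →
      (xs.take k).foldl (pvBStep n) ([], none, 0)
        = ((List.range' 0 (k + 1 - n.toNat)).foldl (pvWStep xs n.toNat) [],
           (if k = 0 then (none : Option Int) else some (xs.getD (k-1) 0)),
           ((pvTrail xs k : Nat) : Int)) := by
  have hNn : ((n.toNat : Nat) : Int) = n := Int.toNat_of_nonneg (by omega)
  have hN1 : 1 ≤ n.toNat := by omega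
  intro k
  induction k with
  | zero =>
    intro _
    rw [show 0 + 1 - n.toNat = 0 from by omega]
    simp [pvTrail]
  | succ k ih =>
    intro hk1
    have hkL : k < xs.length := by omega
    rw [List.take_add_one, List.getElem?_eq_getElem hkL, Option.toList_some, List.foldl_append,
      ih (by omega), List.foldl_cons, List.foldl_nil]
    have hgd : xs[k] = xs.getD k 0 := (List.getD_eq_getElem xs 0 hkL).symm
    rw [hgd]
    set x := xs.getD k 0 with hx
    set W := (List.range' 0 (k + 1 - n.toNat)).foldl (pvWStep xs n.toNat) [] with hW
    -- the run bookkeeping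
    have hrl' : (if (((pvTrail xs k : Nat):Int) > 0 &&
          ((if k = 0 then (none : Option Int) else some (xs.getD (k-1) 0)) == some x))
        then ((pvTrail xs k : Nat):Int) + 1 else 1) = ((pvTrail xs (k+1) : Nat) : Int) := by
      by_cases hk0 : k = 0
      · subst hk0; simp [pvTrail]
      · have hp := pvTrail_pos xs k (by omega)
        rw [if_neg hk0]
        show _ = ((pvTrail xs (k+1) : Nat) : Int)
        rw [pvTrail]
        by_cases he : xs.getD k 0 = xs.getD (k-1) 0
        · rw [if_pos, if_pos]
          · push_cast; ring
          · simp only [Bool.and_eq_true, decide_eq_true_eq, beq_iff_eq]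
            exact ⟨by omega, he⟩
          · simp only [Bool.and_eq_true, decide_eq_true_eq, beq_iff_eq, Option.some.injEq, hx]
            exact ⟨by exact_mod_cast hp, he.symm⟩
        · rw [if_neg, if_neg]
          · rfl
          · simp only [Bool.and_eq_true, decide_eq_true_eq, beq_iff_eq]
            exact fun h => he h.2
          · simp only [Bool.and_eq_true, decide_eq_true_eq, beq_iff_eq, Option.some.injEq, hx]
            exact fun h => he h.2.symm
    have hrv' : (if (((pvTrail xs k : Nat):Int) > 0 &&
          ((if k = 0 then (none : Option Int) else some (xs.getD (k-1) 0)) == some x))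
        then (if k = 0 then (none : Option Int) else some (xs.getD (k-1) 0)) else some x)
        = some x := by
      by_cases hk0 : k = 0
      · subst hk0; simp [pvTrail]
      · split
        · rename_i h; exact absurd h hk0
        · split
          · rename_i hg
            simp only [Bool.and_eq_true] at hg
            exact eq_of_beq hg.2
          · rfl
    rw [pvBStep_eval, hrl', hrv']
    simp only [Prod.mk.injEq]
    refine ⟨?_, by rw [if_neg (Nat.succ_ne_zero k), show k + 1 - 1 = k from by omega, hx], trivial⟩
    by_cases hkN : n.toNat ≤ k + 1
    · rw [show k + 1 + 1 - n.toNat = (k + 1 - n.toNat) + 1 from by omega, List.range'_1_concat,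
        List.foldl_append, List.foldl_cons, List.foldl_nil, Nat.zero_add]
      have hTW := pvTrailWin xs n.toNat k hN1 hkN
      by_cases htr : pvTrail xs (k+1) = n.toNat
      · obtain ⟨hwinB, hrs⟩ := hTW.mp htr
        have hxs : xs.getD (k+1-n.toNat) 0 = x := by
          have hrun := pvTrail_run xs (k+1) (k+1-n.toNat) (by omega) (by omega)
          rw [show k + 1 - 1 = k from by omega] at hrun
          exact hrun.trans hx.symm
        have hc1 : (((pvTrail xs (k+1) : Nat):Int) == n) = true := by
          rw [htr]; exact beq_iff_eq.mpr hNn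
        have hmid : (decide (k+1-n.toNat = 0) ||
            !(xs.getD (k+1-n.toNat-1) 0 == xs.getD (k+1-n.toNat) 0)) = true := by
          rcases hrs with h0 | hne
          · simp [h0]
          · rw [show k+1-n.toNat-1 = k-n.toNat from by omega, beq_eq_false_iff_ne.mpr hne]
            simp
        have hcw : pvWCondB xs n.toNat (k+1-n.toNat) W =
            !((W.map Prod.fst).contains (xs.getD (k+1-n.toNat) 0)) := by
          rw [pvWCondB, hwinB, hmid]; simp
        rw [pvWStep, hcw, hc1, Bool.true_and, hxs]
      · have hc1 : (((pvTrail xs (k+1) : Nat):Int) == n) = false := by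
          rw [beq_eq_false_iff_ne]
          intro hcast; exact htr (by omega)
        rw [hc1, Bool.false_and, if_neg Bool.false_ne_true]
        have hcw : pvWCondB xs n.toNat (k+1-n.toNat) W = false := by
          rw [pvWCondB]
          by_cases hw : pvWinB xs n.toNat (k+1-n.toNat) = true
          · by_cases hm : (decide (k+1-n.toNat = 0) ||
                !(xs.getD (k+1-n.toNat-1) 0 == xs.getD (k+1-n.toNat) 0)) = true
            · exfalso
              apply htr
              apply hTW.mpr
              refine ⟨hw, ?_⟩
              simp only [Bool.or_eq_true, decide_eq_true_eq, Bool.not_eq_true',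
                beq_eq_false_iff_ne] at hm
              rcases hm with h0 | hne
              · exact Or.inl h0
              · rw [show k+1-n.toNat-1 = k-n.toNat from by omega] at hne
                exact Or.inr hne
            · rw [Bool.not_eq_true] at hm
              rw [hm, hw]; simp
          · rw [Bool.not_eq_true] at hw
            rw [hw]; simp
        rw [pvWStep, if_neg (by rw [hcw]; exact Bool.false_ne_true)]
    · have htr : pvTrail xs (k+1) ≠ n.toNat := by
        have := pvTrail_le xs (k+1); omega
      have hc1 : (((pvTrail xs (k+1) : Nat):Int) == n) = false := by
        rw [beq_eq_false_iff_ne]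
        intro hcast; exact htr (by omega)
      rw [hc1, Bool.false_and, if_neg Bool.false_ne_true,
        show k + 1 + 1 - n.toNat = k + 1 - n.toNat from by omega]

-- ===== VERDICT (by name: the statement is the Claim_ definition above) =====
theorem get_first_occurence_of_multiples_spec : Claim_equal_get_first_occurence_of_multiples := by
  unfold Claim_equal_get_first_occurence_of_multiples
  intro xs n _ hpre
  have hn : 1 ≤ n := hpre
  have hA := pvAW xs n hn (xs.length + 1) 0 [] (by omega) (Or.inl rfl)
  have hB := pvBW xs n hn xs.length le_rfl
  rw [List.take_length] at hB
  unfold Spec_get_first_occurence_of_multiples get_first_occurence_of_multiples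
    get_first_occurence_of_multiples_alt
  rw [hB]
  simpa using hA
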